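-- pv_equiv track=rewrite | github.com/thegreathippo/ezparse | ezparse/_get_arg_num.py | get_arg_num
-- ===== SOURCE A (Python) =====
-- def get_arg_num(group):
--   level, commas, values = 0, 0, 0
--   for e in group:
--     if e == "(":
--       level += 1
--     elif e == ")":
--       level -= 1
--     elif level == 1:
--       if e == ",":
--         commas += 1
--         values += 1
--       elif values == 0:
--         values += 1
--   return values
-- ===== SOURCE B (Python) =====
-- def get_arg_num(group):
--   level = 0
--   toks = []
--   for e in group:
--     if e == "(":
--       level += 1
--     elif e == ")":
--       level -= 1
--     elif level == 1:
--       toks.append(e)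
--   commas = toks.count(",")
--   return commas + (1 if toks and toks[0] != "," else 0)
-- ===== Notes on version B (the rewrite author's own statement) =====
-- stated objective: alternative
-- what changed: Replaces A's incremental commas/values counters and values==0 flag by an extract-then-derive pass: collect all depth-1 tokens into a list, then return its comma count plus one if the first collected token is not a comma.
import Mathlib
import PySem

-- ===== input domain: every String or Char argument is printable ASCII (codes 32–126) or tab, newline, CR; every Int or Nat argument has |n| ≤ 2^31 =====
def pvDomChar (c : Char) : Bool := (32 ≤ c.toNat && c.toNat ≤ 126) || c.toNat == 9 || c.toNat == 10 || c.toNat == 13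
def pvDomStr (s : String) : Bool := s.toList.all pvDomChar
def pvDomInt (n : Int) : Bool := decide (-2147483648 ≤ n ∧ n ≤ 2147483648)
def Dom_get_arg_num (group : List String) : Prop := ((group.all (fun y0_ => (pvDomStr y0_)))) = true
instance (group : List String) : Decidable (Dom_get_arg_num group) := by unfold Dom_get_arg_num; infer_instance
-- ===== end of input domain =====

-- B collects the depth-1 tokens into a list and derives the count afterwards instead of maintaining comma/value counters inline; same cost, different decomposition.
-- ===== PORT A =====
def pvStepA (st : Int × Int × Int) (e : String) : Int × Int × Int :=
  if e = "(" then (st.1 + 1, st.2.1, st.2.2)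
  else if e = ")" then (st.1 - 1, st.2.1, st.2.2)
  else if st.1 = 1 then
    if e = "," then (st.1, st.2.1 + 1, st.2.2 + 1)
    else if st.2.2 = 0 then (st.1, st.2.1, st.2.2 + 1)
    else st
  else st

def get_arg_num (group : List String) : Int :=
  (group.foldl pvStepA (0, 0, 0)).2.2

-- ===== PORT B =====
def pvStepB (st : Int × List String) (e : String) : Int × List String :=
  if e = "(" then (st.1 + 1, st.2)
  else if e = ")" then (st.1 - 1, st.2)
  else if st.1 = 1 then (st.1, st.2 ++ [e])
  else st

def pvDerive (toks : List String) : Int :=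
  (PySem.List.count toks "," : Int) +
    (if toks ≠ [] ∧ toks.head? ≠ some "," then 1 else 0)

def get_arg_num_alt (group : List String) : Int :=
  pvDerive (group.foldl pvStepB (0, [])).2

-- ===== PRECONDITION & SPEC =====
def Spec_get_arg_num (group : List String) (out : Int) : Prop := out = get_arg_num_alt group
instance (group : List String) (out : Int) : Decidable (Spec_get_arg_num group out) := by unfold Spec_get_arg_num; infer_instance

-- ===== CLAIM (what is proved, stated in full; the proofs are below) =====
def Claim_equal_get_arg_num : Prop := ∀ (group : List String), Dom_get_arg_num group → Spec_get_arg_num group (get_arg_num group)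

-- ===== LEMMAS AND PROOFS =====


lemma pvDerive_nil : pvDerive [] = 0 := by decide

lemma pvDerive_eq_zero_iff (toks : List String) : pvDerive toks = 0 ↔ toks = [] := by
  constructor
  · intro h
    cases toks with
    | nil => rfl
    | cons t ts =>
      exfalso
      simp only [pvDerive, PySem.List.count_eq, List.head?_cons] at h
      by_cases ht : t = ","
      · subst ht
        rw [if_neg (by simp)] at h
        have h1 : ("," :: ts).count "," = ts.count "," + 1 := by simp
        omega
      · rw [if_pos ⟨by simp, by simp [ht]⟩] at h
        have := Int.natCast_nonneg ((t :: ts).count ",")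
        omega
  · intro h; subst h; decide

lemma pvCountAppendSelf (l : List String) :
    List.count ("," : String) (l ++ [","]) = List.count ("," : String) l + 1 := by
  induction l with
  | nil => decide
  | cons x xs ih =>
    simp only [List.cons_append, List.count_cons, ih]
    split_ifs <;> omega

lemma pvDerive_append_comma (toks : List String) :
    pvDerive (toks ++ [","]) = pvDerive toks + 1 := by
  cases toks with
  | nil => decide
  | cons t ts =>
    have hc : PySem.List.count (t :: (ts ++ [","])) ","
        = PySem.List.count (t :: ts) "," + 1 := by
      simp only [PySem.List.count_eq]
      exact pvCountAppendSelf (t :: ts)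
    simp only [pvDerive, List.cons_append, hc, ne_eq, List.head?_cons,
      List.cons_ne_nil, not_false_iff, true_and]
    push_cast
    generalize (if ¬ some t = some ("," : String) then (1 : Int) else 0) = F
    omega

lemma pvDerive_append_other (toks : List String) (e : String) (he : e ≠ ",") :
    pvDerive (toks ++ [e]) = if toks = [] then 1 else pvDerive toks := by
  simp only [pvDerive, PySem.List.count_eq, List.count_append, List.count_singleton]
  cases toks with
  | nil =>
    simp [List.count_cons, he, List.count_nil, (fun h => he h : e = "," → False)]
  | cons t ts =>
    simp only [List.cons_append, List.head?_cons, List.count_cons]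
    split_ifs with h1 <;> simp_all [beq_iff_eq, he]

lemma pv_inv (g : List String) : ∀ (level : Int) (toks : List String),
    g.foldl pvStepA (level, (PySem.List.count toks "," : Int), pvDerive toks)
      = ((g.foldl pvStepB (level, toks)).1,
         ((PySem.List.count (g.foldl pvStepB (level, toks)).2 ",") : Int),
         pvDerive (g.foldl pvStepB (level, toks)).2) := by
  induction g with
  | nil => intro level toks; simp [List.foldl]
  | cons e g ih =>
    intro level toks
    simp only [List.foldl_cons]
    by_cases h1 : e = "("
    · rw [show pvStepA (level, ((PySem.List.count toks ",") : Int), pvDerive toks) e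
          = (level + 1, ((PySem.List.count toks ",") : Int), pvDerive toks) by simp [pvStepA, h1],
          show pvStepB (level, toks) e = (level + 1, toks) by simp [pvStepB, h1]]
      exact ih (level + 1) toks
    · by_cases h2 : e = ")"
      · rw [show pvStepA (level, ((PySem.List.count toks ",") : Int), pvDerive toks) e
            = (level - 1, ((PySem.List.count toks ",") : Int), pvDerive toks) by simp [pvStepA, h1, h2],
            show pvStepB (level, toks) e = (level - 1, toks) by simp [pvStepB, h1, h2]]
        exact ih (level - 1) toks
      · by_cases h3 : level = 1
        · rw [show pvStepB (level, toks) e = (level, toks ++ [e]) by simp [pvStepB, h1, h2, h3]]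
          by_cases h4 : e = ","
          · rw [show pvStepA (level, ((PySem.List.count toks ",") : Int), pvDerive toks) e
                = (level, ((PySem.List.count toks ",") : Int) + 1, pvDerive toks + 1) by
                  simp [pvStepA, h1, h2, h3, h4]]
            have hc : ((PySem.List.count (toks ++ [e]) ",") : Int)
                = ((PySem.List.count toks ",") : Int) + 1 := by
              simp [PySem.List.count_eq, List.count_append, h4]
            have hd : pvDerive (toks ++ [e]) = pvDerive toks + 1 := by
              rw [h4]; exact pvDerive_append_comma toks
            rw [← hc, ← hd]
            exact ih level (toks ++ [e])
          · have hc : ((PySem.List.count (toks ++ [e]) ",") : Int)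
                = ((PySem.List.count toks ",") : Int) := by
              simp [PySem.List.count_eq, List.count_append, List.count_singleton, h4]
            by_cases h5 : toks = []
            · subst h5
              rw [show pvStepA (level, ((PySem.List.count ([] : List String) ",") : Int), pvDerive []) e
                  = (level, 0, 1) by
                    simp [pvStepA, h1, h2, h3, h4, pvDerive_nil, PySem.List.count_eq]]
              have hd : pvDerive ([] ++ [e]) = 1 := by
                rw [pvDerive_append_other [] e h4]; simp
              have hc0 : ((PySem.List.count (([] : List String) ++ [e]) ",") : Int) = 0 := by
                simpa [PySem.List.count_eq] using hc
              rw [show ((0 : Int), (1 : Int)) = (((PySem.List.count (([] : List String) ++ [e]) ",") : Int), pvDerive ([] ++ [e])) by rw [hc0, hd]]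
              exact ih level ([] ++ [e])
            · have hv : pvDerive toks ≠ 0 := fun h => h5 ((pvDerive_eq_zero_iff toks).mp h)
              rw [show pvStepA (level, ((PySem.List.count toks ",") : Int), pvDerive toks) e
                  = (level, ((PySem.List.count toks ",") : Int), pvDerive toks) by
                    simp [pvStepA, h1, h2, h3, h4, hv]]
              have hd : pvDerive (toks ++ [e]) = pvDerive toks := by
                rw [pvDerive_append_other toks e h4, if_neg h5]
              rw [← hc, ← hd]
              exact ih level (toks ++ [e])
        · rw [show pvStepA (level, ((PySem.List.count toks ",") : Int), pvDerive toks) e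
              = (level, ((PySem.List.count toks ",") : Int), pvDerive toks) by
                simp [pvStepA, h1, h2, h3],
              show pvStepB (level, toks) e = (level, toks) by simp [pvStepB, h1, h2, h3]]
          exact ih level toks

-- ===== VERDICT (by name: the statement is the Claim_ definition above) =====
theorem get_arg_num_spec : Claim_equal_get_arg_num := by
  intro group _
  unfold Spec_get_arg_num get_arg_num get_arg_num_alt
  have h := pv_inv group 0 []
  simp only [PySem.List.count_eq, List.count_nil, pvDerive_nil, Nat.cast_zero] at h ⊢
  rw [h]
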